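-- pv_equiv track=rewrite | github.com/marcie-kang/codewars-solutions | python/[6kyu] Street Fighter 2 - Character Selection.py | street_fighter_selection
-- ===== SOURCE A (Python) =====
-- def street_fighter_selection(fighters, initial_position, moves):
--     current = initial_position
--     answer = []
--
--     for move in moves:
--         if move == "right":
--             if current[1] + 1 > len(fighters[current[0]]) - 1:
--                 current = (current[0], 0)
--             else:
--                 current = (current[0], current[1] + 1)
--         elif move == "left":
--             if (current[1] - 1) * -1 > len(fighters[current[0]]):
--                 current = (current[0], len(fighters[current[0]]) - 1)
--             else:
--                 current = (current[0], current[1] - 1)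
--         elif move == "up":
--             if current[0] != 0:
--                 current = (current[0] - 1, current[1])
--         elif move == "down":
--             if current[0] != 1:
--                 current = (current[0] + 1, current[1])
--
--         answer.append(fighters[current[0]][current[1]])
--
--     return answer
-- ===== SOURCE B (Python) =====
-- def street_fighter_selection(fighters, initial_position, moves):
--     r0, c0 = initial_position
--     # pass 1: the row after each move is simply set by the most recent vertical
--     # move ("up" -> row 0, "down" -> row 1), no clamped increments needed
--     rows = []
--     r = r0
--     for m in moves:
--         if m == "up":
--             r = 0
--         elif m == "down":
--             r = 1
--         rows.append(r)
--     # pass 2: the column is the running net of +1/-1 horizontal deltas,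
--     # kept as an unbounded integer (no wrap branches)
--     delta = {"right": 1, "left": -1}
--     nets = []
--     n = c0
--     for m in moves:
--         n += delta.get(m, 0)
--         nets.append(n)
--     # pass 3: map each (row, net) pair to a fighter, reducing the net
--     # modulo the row width only at lookup time
--     return [fighters[r][n % len(fighters[r])] for r, n in zip(rows, nets)]
-- ===== Notes on version B (the rewrite author's own statement) =====
-- stated objective: alternative
-- what changed: Replaces A's single branchy wrap/clamp cursor simulation by three staged passes: the row sequence is produced by overwriting with 0/1 at each vertical move (last-vertical-move rule), the column is an unbounded running net of +1/-1 horizontal deltas with no wrap branches, and a final zip-map reduces each net modulo the row width at lookup time. Pre_ excludes inputs whose trajectory-dependent indexing can leave the grid or hinges on Python negative-index wraparound into rows of a different length (unequal-width rows reached after a horizontal wrap, or verticals started off rows 0/1).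
-- outside the precondition, e.g. on street_fighter_selection([['a'], ['b'], ['c']], (2, 0), ['up']): A returns ['b'], B returns ['a']
import Mathlib
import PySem

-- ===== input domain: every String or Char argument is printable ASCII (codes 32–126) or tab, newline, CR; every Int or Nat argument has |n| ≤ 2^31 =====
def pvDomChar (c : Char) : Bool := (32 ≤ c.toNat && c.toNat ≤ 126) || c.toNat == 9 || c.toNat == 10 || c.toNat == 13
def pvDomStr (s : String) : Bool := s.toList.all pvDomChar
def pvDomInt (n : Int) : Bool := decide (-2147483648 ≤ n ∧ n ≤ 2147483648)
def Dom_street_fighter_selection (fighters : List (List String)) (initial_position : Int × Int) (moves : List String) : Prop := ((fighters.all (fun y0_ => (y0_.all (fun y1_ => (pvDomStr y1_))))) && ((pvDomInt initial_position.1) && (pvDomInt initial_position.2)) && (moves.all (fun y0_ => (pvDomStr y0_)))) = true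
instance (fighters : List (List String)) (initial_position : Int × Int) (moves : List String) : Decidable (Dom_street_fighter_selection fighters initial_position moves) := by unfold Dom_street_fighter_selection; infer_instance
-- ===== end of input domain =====

-- B replaces A's single branchy wrap/clamp cursor simulation by three staged passes:
-- rows by the last-vertical-move overwrite rule, columns as an unbounded running net of
-- +1/-1 horizontal deltas (no wrap branches), then a zip-map that reduces each net modulo
-- the row width at lookup time (objective: alternative, same cost).

-- ===== PORT A =====
def sfStepA (fighters : List (List String)) (st : (Int × Int) × List String) (move : String) : (Int × Int) × List String :=
  let current := st.1
  let current :=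
    if move = "right" then
      let row := (PySem.List.pyGet? fighters current.1).getD []
      if current.2 + 1 > (row.length : Int) - 1 then (current.1, (0 : Int))
      else (current.1, current.2 + 1)
    else if move = "left" then
      let row := (PySem.List.pyGet? fighters current.1).getD []
      if (current.2 - 1) * (-1) > (row.length : Int) then (current.1, (row.length : Int) - 1)
      else (current.1, current.2 - 1)
    else if move = "up" then
      if current.1 ≠ 0 then (current.1 - 1, current.2) else current
    else if move = "down" then
      if current.1 ≠ 1 then (current.1 + 1, current.2) else current
    else current
  let row := (PySem.List.pyGet? fighters current.1).getD []
  (current, st.2 ++ [(PySem.List.pyGet? row current.2).getD ""])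

def street_fighter_selection (fighters : List (List String)) (initial_position : Int × Int) (moves : List String) : List String :=
  (moves.foldl (sfStepA fighters) (initial_position, [])).2

-- ===== PORT B =====
-- pass 1 of Source B: rows appended with the overwrite rule (loop → structural recursion on moves)
def sfRowsGo (r : Int) (moves : List String) : List Int :=
  match moves with
  | [] => []
  | m :: ms =>
    let r' := if m = "up" then 0 else if m = "down" then 1 else r
    r' :: sfRowsGo r' ms

-- pass 2 of Source B: running net of +1/-1 horizontal deltas
def sfNetsGo (n : Int) (moves : List String) : List Int :=
  match moves with
  | [] => []
  | m :: ms =>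
    let n' := n + (if m = "right" then 1 else if m = "left" then -1 else 0)
    n' :: sfNetsGo n' ms

-- pass 3 of Source B: fighters[r][n % len(fighters[r])]
def sfPick (fighters : List (List String)) (r n : Int) : String :=
  (PySem.List.pyGet? ((PySem.List.pyGet? fighters r).getD [])
    (PySem.Int.mod n ((((PySem.List.pyGet? fighters r).getD []).length : Int)))).getD ""

def street_fighter_selection_alt (fighters : List (List String)) (initial_position : Int × Int) (moves : List String) : List String :=
  (List.zip (sfRowsGo initial_position.1 moves) (sfNetsGo initial_position.2 moves)).map
    (fun p => sfPick fighters p.1 p.2)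

-- ===== PRECONDITION & SPEC =====
-- Pre_ excludes only the inputs on which A's trajectory-dependent indexing can leave the grid
-- or hinges on Python negative-index wraparound into rows of a different length: it admits
-- empty move lists, any valid start from which no vertical move can change the row ("up" only
-- from row 0, "down" only from row 1), the kata's two-equal-width-rows grid with the cursor
-- started on row 0 or 1, and vertical-only move lists over rows 0/1 whose column is a valid
-- index in both of those rows (see the cites in claim.json).
def Pre_street_fighter_selection (fighters : List (List String)) (initial_position : Int × Int) (moves : List String) : Prop :=
  moves = [] ∨
  (0 < ((PySem.List.pyGet? fighters initial_position.1).getD []).length ∧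
   -((((PySem.List.pyGet? fighters initial_position.1).getD []).length : Int)) ≤ initial_position.2 ∧
   initial_position.2 < (((PySem.List.pyGet? fighters initial_position.1).getD []).length : Int) ∧
   ((("up" ∈ moves → initial_position.1 = 0) ∧ ("down" ∈ moves → initial_position.1 = 1)) ∨
    (2 ≤ fighters.length ∧
     (fighters.getD 1 []).length = (fighters.getD 0 []).length ∧
     (initial_position.1 = 0 ∨ initial_position.1 = 1)))) ∨
  ("left" ∉ moves ∧ "right" ∉ moves ∧ 2 ≤ fighters.length ∧
   (initial_position.1 = 0 ∨ initial_position.1 = 1) ∧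
   0 < (fighters.getD 0 []).length ∧ 0 < (fighters.getD 1 []).length ∧
   -(((fighters.getD 0 []).length : Int)) ≤ initial_position.2 ∧
   initial_position.2 < ((fighters.getD 0 []).length : Int) ∧
   -(((fighters.getD 1 []).length : Int)) ≤ initial_position.2 ∧
   initial_position.2 < ((fighters.getD 1 []).length : Int))
instance (fighters : List (List String)) (initial_position : Int × Int) (moves : List String) : Decidable (Pre_street_fighter_selection fighters initial_position moves) := by unfold Pre_street_fighter_selection; infer_instance

def pvWitness_street_fighter_selection : List (List String) × (Int × Int) × List String :=
  ([["ryu", "ken", "chunli"], ["blanka", "guile", "honda"]], (0, 0), ["right", "down", "left", "left", "up"])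

def Spec_street_fighter_selection (fighters : List (List String)) (initial_position : Int × Int) (moves : List String) (out : List String) : Prop := out = street_fighter_selection_alt fighters initial_position moves
instance (fighters : List (List String)) (initial_position : Int × Int) (moves : List String) (out : List String) : Decidable (Spec_street_fighter_selection fighters initial_position moves out) := by unfold Spec_street_fighter_selection; infer_instance

-- ===== CLAIM (what is proved, stated in full; the proofs are below) =====
def Claim_equal_street_fighter_selection : Prop := ∀ (fighters : List (List String)) (initial_position : Int × Int) (moves : List String), Dom_street_fighter_selection fighters initial_position moves → Pre_street_fighter_selection fighters initial_position moves → Spec_street_fighter_selection fighters initial_position moves (street_fighter_selection fighters initial_position moves)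

-- ===== LEMMAS AND PROOFS =====

-- a valid Python index (possibly negative) reads the same element as its normalisation mod len
lemma pyGet?_mod (row : List String) (c : Int) (h1 : 0 < row.length)
    (h2 : -(row.length : Int) ≤ c) (h3 : c < (row.length : Int)) :
    PySem.List.pyGet? row (PySem.Int.mod c (row.length : Int)) = PySem.List.pyGet? row c := by
  rw [PySem.Int.mod_eq_emod_of_pos (by exact_mod_cast h1)]
  by_cases hc : 0 ≤ c
  · rw [Int.emod_eq_of_lt hc h3]
  · have h4 : (c + (row.length : Int)) % (row.length : Int) = c % (row.length : Int) := by
      rw [show c + (row.length : Int) = c + (row.length : Int) * 1 by ring,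
        Int.add_mul_emod_self_left]
    have hmod : c % (row.length : Int) = c + (row.length : Int) := by
      rw [← h4, Int.emod_eq_of_lt (by omega) (by omega)]
    rw [hmod, PySem.List.pyGet?_of_nonneg row (i := c + (row.length : Int)) (by omega)]
    have hk : c = -(((-c).toNat : Nat) : Int) := by omega
    rw [hk, PySem.List.pyGet?_neg_natCast row (-c).toNat (by omega) (by omega)]
    congr 1
    omega

-- two ints congruent mod a positive w have the same Python remainder
lemma pymod_congr (w : Nat) (hw : 0 < w) (a b : Int) (h : a % (w : Int) = b % (w : Int)) :
    PySem.Int.mod a (w : Int) = PySem.Int.mod b (w : Int) := by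
  have hw' : (0 : Int) < (w : Int) := by exact_mod_cast hw
  rw [PySem.Int.mod_eq_emod_of_pos hw', PySem.Int.mod_eq_emod_of_pos hw', h]

-- rows 0 and 1 of the destructured two-row grid both have l0's width
lemma sf_rowlen (l0 l1 : List String) (rest : List (List String)) (hlen : l1.length = l0.length)
    (r : Int) (hr : r = 0 ∨ r = 1) :
    ((PySem.List.pyGet? (l0 :: l1 :: rest) r).getD []).length = l0.length := by
  rcases hr with h | h <;> subst h
  · rw [PySem.List.pyGet?_zero_cons]; rfl
  · rw [show (1 : Int) = ((1 : Nat) : Int) by norm_num,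
      PySem.List.pyGet?_ofNat _ 1 (by simp)]
    simpa using hlen

-- one move: A's branchy update produces a row matching B's overwrite rule and a column
-- that stays in [-w, w) and congruent (mod w) to B's running net
lemma sf_step (fighters : List (List String)) (w : Nat) (hw : 0 < w)
    (Rok : Int → Prop)
    (hrow : ∀ r, Rok r → ((PySem.List.pyGet? fighters r).getD []).length = w)
    (m : String) (r c n : Int) (acc : List String) (hr : Rok r)
    (hm : (m = "up" → (if r ≠ 0 then r - 1 else r) = 0 ∧ Rok 0) ∧
          (m = "down" → (if r ≠ 1 then r + 1 else r) = 1 ∧ Rok 1))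
    (hc1 : -(w : Int) ≤ c) (hc2 : c < (w : Int)) (hcong : c % (w : Int) = n % (w : Int)) :
    ∃ r' c',
      sfStepA fighters ((r, c), acc) m
        = ((r', c'), acc ++ [(PySem.List.pyGet? ((PySem.List.pyGet? fighters r').getD []) c').getD ""]) ∧
      r' = (if m = "up" then 0 else if m = "down" then 1 else r) ∧
      Rok r' ∧ -(w : Int) ≤ c' ∧ c' < (w : Int) ∧
      c' % (w : Int) = (n + (if m = "right" then 1 else if m = "left" then -1 else 0)) % (w : Int) := by
  have hwr := hrow r hr
  have haddR : (c + 1) % (w : Int) = (n + 1) % (w : Int) := Int.ModEq.add_right 1 hcong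
  have haddL : (c - 1) % (w : Int) = (n - 1) % (w : Int) := Int.ModEq.sub_right 1 hcong
  by_cases hm1 : m = "right"
  · subst hm1
    by_cases hcond : c + 1 > (w : Int) - 1
    · refine ⟨r, 0, ?_, by simp, hr, by omega, by exact_mod_cast hw, ?_⟩
      · simp only [sfStepA, hwr]
        split_ifs <;> simp_all
      · simp only [reduceIte]
        rw [Int.zero_emod, ← haddR, show c + 1 = (w : Int) from by omega, Int.emod_self]
    · refine ⟨r, c + 1, ?_, by simp, hr, by omega, by omega, by simpa using haddR⟩
      simp only [sfStepA, hwr]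
      split_ifs <;> simp_all
  · by_cases hm2 : m = "left"
    · subst hm2
      by_cases hcond : (c - 1) * (-1) > (w : Int)
      · refine ⟨r, (w : Int) - 1, ?_, by simp, hr, by omega, by omega, ?_⟩
        · simp only [sfStepA, hwr]
          split_ifs <;> simp_all
        · rw [if_neg hm1, if_pos rfl, show (n + -1) = n - 1 from by ring, ← haddL,
            show c - 1 = (w : Int) - 1 + (w : Int) * (-2) from by omega,
            Int.add_mul_emod_self_left, Int.emod_eq_of_lt (by omega) (by omega)]
      · refine ⟨r, c - 1, ?_, by simp, hr, by omega, by omega, ?_⟩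
        · simp only [sfStepA, hwr]
          split_ifs <;> simp_all
        · rw [if_neg hm1, if_pos rfl, show (n + -1) = n - 1 from by ring, ← haddL]
    · by_cases hm3 : m = "up"
      · subst hm3
        obtain ⟨h0, hR0⟩ := hm.1 rfl
        refine ⟨0, c, ?_, by simp, hR0, hc1, hc2, by simpa using hcong⟩
        simp only [sfStepA]
        split_ifs <;> simp_all
      · by_cases hm4 : m = "down"
        · subst hm4
          obtain ⟨h1, hR1⟩ := hm.2 rfl
          refine ⟨1, c, ?_, by simp [hm3], hR1, hc1, hc2, by simpa using hcong⟩
          simp only [sfStepA]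
          split_ifs <;> simp_all
        · refine ⟨r, c, ?_, by simp [hm3, hm4], hr, hc1, hc2, by simpa [hm1, hm2] using hcong⟩
          simp [sfStepA, hm1, hm2, hm3, hm4]

-- main loop invariant: A's fold equals acc ++ B's zip of rows and nets mapped through sfPick
lemma sf_loop (fighters : List (List String)) (w : Nat) (hw : 0 < w)
    (Rok : Int → Prop)
    (hrow : ∀ r, Rok r → ((PySem.List.pyGet? fighters r).getD []).length = w) :
    ∀ (moves : List String) (r c n : Int) (acc : List String),
      Rok r →
      (∀ m ∈ moves,
        (m = "up" → ∀ r', Rok r' → (if r' ≠ 0 then r' - 1 else r') = 0 ∧ Rok 0) ∧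
        (m = "down" → ∀ r', Rok r' → (if r' ≠ 1 then r' + 1 else r') = 1 ∧ Rok 1)) →
      -(w : Int) ≤ c → c < (w : Int) → c % (w : Int) = n % (w : Int) →
      (moves.foldl (sfStepA fighters) ((r, c), acc)).2
        = acc ++ (List.zip (sfRowsGo r moves) (sfNetsGo n moves)).map (fun p => sfPick fighters p.1 p.2) := by
  intro moves
  induction moves with
  | nil => intro r c n acc _ _ _ _ _; simp [sfRowsGo, sfNetsGo]
  | cons m ms ih =>
    intro r c n acc hr hmv hc1 hc2 hcong
    obtain ⟨hu, hd⟩ := hmv m (List.mem_cons_self ..)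
    obtain ⟨r', c', hA, hr'eq, hr', hc1', hc2', hcong'⟩ :=
      sf_step fighters w hw Rok hrow m r c n acc hr
        ⟨fun h => hu h r hr, fun h => hd h r hr⟩ hc1 hc2 hcong
    have hWlen : ((PySem.List.pyGet? fighters r').getD []).length = w := hrow r' hr'
    have hname : (PySem.List.pyGet? ((PySem.List.pyGet? fighters r').getD []) c').getD ""
        = sfPick fighters r' (n + (if m = "right" then 1 else if m = "left" then -1 else 0)) := by
      unfold sfPick
      rw [hWlen, pymod_congr w hw _ c' (hcong'.symm), ← hWlen,
        pyGet?_mod _ c' (by rw [hWlen]; exact hw) (by rw [hWlen]; exact hc1')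
          (by rw [hWlen]; exact hc2')]
    rw [List.foldl_cons, hA,
      ih r' c' _ _ hr' (fun x hx => hmv x (List.mem_cons_of_mem _ hx)) hc1' hc2' hcong',
      sfRowsGo, sfNetsGo, ← hr'eq, List.zip_cons_cons, List.map_cons, hname,
      List.append_assoc, List.singleton_append]


-- vertical-only step: A's clamped row update coincides with the overwrite rule on rows 0/1
lemma sfStepA_vert (fighters : List (List String)) (m : String) (r c : Int) (acc : List String)
    (hml : m ≠ "left") (hmr : m ≠ "right") (hr : r = 0 ∨ r = 1) :
    sfStepA fighters ((r, c), acc) m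
      = (((if m = "up" then 0 else if m = "down" then 1 else r), c),
         acc ++ [(PySem.List.pyGet? ((PySem.List.pyGet? fighters
             (if m = "up" then 0 else if m = "down" then 1 else r)).getD []) c).getD ""]) := by
  by_cases hu : m = "up"
  · subst hu
    simp only [sfStepA]
    rcases hr with h | h <;> subst h <;> split_ifs <;> simp_all
  · by_cases hd : m = "down"
    · subst hd
      simp only [sfStepA]
      rcases hr with h | h <;> subst h <;> split_ifs <;> simp_all
    · simp [sfStepA, hml, hmr, hu, hd]

-- vertical-only move lists: the column never changes, so the two visited rows may have
-- different widths as long as the fixed column is a valid index in both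
lemma sf_loop_vert (l0 l1 : List String) (rest : List (List String))
    (h0 : 0 < l0.length) (h1 : 0 < l1.length) :
    ∀ (moves : List String) (r c : Int) (acc : List String),
      (r = 0 ∨ r = 1) →
      (∀ m ∈ moves, m ≠ "left" ∧ m ≠ "right") →
      -((l0.length : Int)) ≤ c → c < (l0.length : Int) →
      -((l1.length : Int)) ≤ c → c < (l1.length : Int) →
      (moves.foldl (sfStepA (l0 :: l1 :: rest)) ((r, c), acc)).2
        = acc ++ (List.zip (sfRowsGo r moves) (sfNetsGo c moves)).map (fun p => sfPick (l0 :: l1 :: rest) p.1 p.2) := by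
  intro moves
  induction moves with
  | nil => intro r c acc _ _ _ _ _ _; simp [sfRowsGo, sfNetsGo]
  | cons m ms ih =>
    intro r c acc hr hmv hc01 hc02 hc11 hc12
    obtain ⟨hml, hmr⟩ := hmv m (List.mem_cons_self ..)
    have hpick : ∀ r', (r' = 0 ∨ r' = 1) →
        sfPick (l0 :: l1 :: rest) r' c
          = (PySem.List.pyGet? ((PySem.List.pyGet? (l0 :: l1 :: rest) r').getD []) c).getD "" := by
      intro r' hr'
      unfold sfPick
      rcases hr' with h | h <;> subst h
      · rw [PySem.List.pyGet?_zero_cons, Option.getD_some, pyGet?_mod l0 c h0 hc01 hc02]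
      · rw [show (1 : Int) = ((1 : Nat) : Int) by norm_num,
          PySem.List.pyGet?_ofNat _ 1 (by simp), Option.getD_some]
        simp only [List.getElem_cons_succ, List.getElem_cons_zero]
        rw [pyGet?_mod l1 c h1 hc11 hc12]
    obtain ⟨r', hr'def, hr'⟩ :
        ∃ r', r' = (if m = "up" then 0 else if m = "down" then 1 else r) ∧ (r' = 0 ∨ r' = 1) := by
      refine ⟨_, rfl, ?_⟩
      split_ifs
      · exact Or.inl rfl
      · exact Or.inr rfl
      · exact hr
    have hnet : sfNetsGo c (m :: ms) = c :: sfNetsGo c ms := by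
      simp only [sfNetsGo, hmr, hml]
      norm_num
    rw [List.foldl_cons, sfStepA_vert (l0 :: l1 :: rest) m r c acc hml hmr hr, ← hr'def,
      ih r' c _ hr' (fun x hx => hmv x (List.mem_cons_of_mem _ hx)) hc01 hc02 hc11 hc12,
      sfRowsGo, hnet, ← hr'def, List.zip_cons_cons, List.map_cons, hpick r' hr',
      List.append_assoc, List.singleton_append]

-- ===== VERDICT (by name: the statement is the Claim_ definition above) =====
theorem street_fighter_selection_spec : Claim_equal_street_fighter_selection := by
  intro fighters ip moves _hdom hpre
  unfold Spec_street_fighter_selection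
  rcases hpre with h | ⟨hpos, hc1, hc2, hcase⟩ | ⟨hl, hrr, h2, hr, h0, h1, hb01, hb02, hb11, hb12⟩
  case inr.inr =>
    match fighters, h2 with
    | l0 :: l1 :: rest, _ =>
      simp only [List.getD_cons_zero, List.getD_cons_succ] at h0 h1 hb01 hb02 hb11 hb12
      unfold street_fighter_selection street_fighter_selection_alt
      rw [show ip = (ip.1, ip.2) from rfl,
        sf_loop_vert l0 l1 rest h0 h1 moves ip.1 ip.2 [] hr
          (fun m hm => ⟨fun h => hl (h ▸ hm), fun h => hrr (h ▸ hm)⟩)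
          hb01 hb02 hb11 hb12]
      simp
  · subst h
    simp [street_fighter_selection, street_fighter_selection_alt, sfRowsGo, sfNetsGo]
  unfold street_fighter_selection street_fighter_selection_alt
  rcases hcase with ⟨hnu, hnd⟩ | ⟨h2, hlen, hr⟩
  · rw [show ip = (ip.1, ip.2) from rfl,
      sf_loop fighters ((PySem.List.pyGet? fighters ip.1).getD []).length hpos
        (· = ip.1) (fun r hr => by rw [hr]) moves ip.1 ip.2 ip.2 [] rfl
        (fun m hm =>
          ⟨fun hup r' hr' => by
             have h0 := hnu (hup ▸ hm); subst hr'; simp [h0],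
           fun hdn r' hr' => by
             have h1 := hnd (hdn ▸ hm); subst hr'; simp [h1]⟩)
        hc1 hc2 rfl]
    simp
  · match fighters, h2 with
    | l0 :: l1 :: rest, _ =>
      simp only [List.getD_cons_zero, List.getD_cons_succ] at hlen
      have hrow := sf_rowlen l0 l1 rest hlen ip.1 hr
      rw [hrow] at hpos hc1 hc2
      rw [show ip = (ip.1, ip.2) from rfl,
        sf_loop (l0 :: l1 :: rest) l0.length hpos (fun r => r = 0 ∨ r = 1)
          (sf_rowlen l0 l1 rest hlen) moves ip.1 ip.2 ip.2 [] hr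
          (fun m _ =>
            ⟨fun _ r' hr' => ⟨by rcases hr' with h | h <;> subst h <;> simp, Or.inl rfl⟩,
             fun _ r' hr' => ⟨by rcases hr' with h | h <;> subst h <;> simp, Or.inr rfl⟩⟩)
          hc1 hc2 rfl]
      simp
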